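-- pv_equiv track=rewrite | github.com/LuciferVid/learning_analytics | src/pdf_export.py | _break_long_tokens
-- ===== SOURCE A (Python) =====
-- def _break_long_tokens(text: str, max_token_len: int = 40) -> str:
--     """
--     Insert spaces inside very long unbroken tokens (e.g., URLs) so FPDF can wrap lines.
--     """
--     out: list[str] = []
--     for token in text.split(" "):
--         if len(token) <= max_token_len:
--             out.append(token)
--             continue
--         chunks = [token[i : i + max_token_len] for i in range(0, len(token), max_token_len)]
--         out.append(" ".join(chunks))
--     return " ".join(out)
-- ===== SOURCE B (Python) =====
-- def _break_long_tokens(text: str, max_token_len: int = 40) -> str: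
--     """Single character-level scan: copy chars, inserting a space whenever a
--     run of max_token_len consecutive non-space characters would be exceeded."""
--     out = []
--     run = 0
--     for ch in text:
--         if ch == " ":
--             out.append(ch)
--             run = 0
--         else:
--             if run == max_token_len:
--                 out.append(" ")
--                 run = 0
--             out.append(ch)
--             run += 1
--     return "".join(out)
-- ===== Notes on version B (the rewrite author's own statement) =====
-- stated objective: alternative
-- what changed: Replaces split-on-space / range-slicing / double-join with a single character-level scan that keeps a run counter of consecutive non-space characters and inserts a space whenever the run would exceed max_token_len.
-- outside the precondition, e.g. on _break_long_tokens('ab', 0): A raises ValueError, B returns ' ab'; on _break_long_tokens('ab', -1): A returns '', B returns 'ab'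
import Mathlib
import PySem

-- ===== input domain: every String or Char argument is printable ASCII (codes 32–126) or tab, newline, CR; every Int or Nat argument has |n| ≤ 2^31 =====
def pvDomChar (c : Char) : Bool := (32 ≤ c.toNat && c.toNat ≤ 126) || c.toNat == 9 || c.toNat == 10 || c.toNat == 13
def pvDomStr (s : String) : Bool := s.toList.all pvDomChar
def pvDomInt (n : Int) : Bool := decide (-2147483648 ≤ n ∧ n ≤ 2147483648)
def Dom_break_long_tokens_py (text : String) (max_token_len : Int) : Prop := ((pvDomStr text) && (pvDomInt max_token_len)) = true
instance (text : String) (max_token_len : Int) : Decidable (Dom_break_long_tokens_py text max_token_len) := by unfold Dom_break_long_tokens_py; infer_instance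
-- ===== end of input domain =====

-- B replaces A's split-on-space / range-slicing / double-join pipeline by a single character-level
-- scan with a run counter (alternative decomposition, same cost).


-- ===== PORT A =====
def break_long_tokens_py (text : String) (max_token_len : Int) : String :=
  let out : List (List Char) :=
    (PySem.Chars.splitOn text.toList [' ']).foldl (fun out token =>
      if PySem.Chars.len token ≤ max_token_len then out ++ [token]
      else
        let chunks := (PySem.List.pyRange 0 (PySem.Chars.len token) max_token_len).map
          (fun i => PySem.Chars.slice token (some i) (some (i + max_token_len)))
        out ++ [PySem.Chars.join [' '] chunks]) []
  String.ofList (PySem.Chars.join [' '] out)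

-- ===== PORT B =====
def break_long_tokens_py_alt (text : String) (max_token_len : Int) : String :=
  let st := text.toList.foldl (fun (st : List Char × Int) ch =>
    if ch = ' ' then (st.1 ++ [ch], 0)
    else if st.2 = max_token_len then (st.1 ++ [' ', ch], 1)
    else (st.1 ++ [ch], st.2 + 1)) ([], 0)
  String.ofList st.1

-- ===== PRECONDITION & SPEC =====
-- Pre_ restricts to the function's natural domain max_token_len ≥ 1 (plus the all-space texts, on
-- which every max_token_len behaves alike): for max_token_len ≤ 0 and a text with a non-space
-- character A raises ValueError (range step 0) or, for negative max_token_len — outside the natural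
-- domain of a chunk length — silently drops every nonempty token.
def Pre_break_long_tokens_py (text : String) (max_token_len : Int) : Prop :=
  1 ≤ max_token_len ∨ text.toList.all (· == ' ') = true
instance (text : String) (max_token_len : Int) : Decidable (Pre_break_long_tokens_py text max_token_len) := by unfold Pre_break_long_tokens_py; infer_instance
def pvWitness_break_long_tokens_py : String × Int := ("see https://example.com/a-quite-long-url", 8)

def Spec_break_long_tokens_py (text : String) (max_token_len : Int) (out : String) : Prop := out = break_long_tokens_py_alt text max_token_len
instance (text : String) (max_token_len : Int) (out : String) : Decidable (Spec_break_long_tokens_py text max_token_len out) := by unfold Spec_break_long_tokens_py; infer_instance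

-- ===== CLAIM (what is proved, stated in full; the proofs are below) =====
def Claim_equal_break_long_tokens_py : Prop := ∀ (text : String) (max_token_len : Int), Dom_break_long_tokens_py text max_token_len → Pre_break_long_tokens_py text max_token_len → Spec_break_long_tokens_py text max_token_len (break_long_tokens_py text max_token_len)

-- ===== LEMMAS AND PROOFS =====

-- The character scan of B, as a structural recursion (run counter in the first argument).
def pvScan (n : Int) : Int → List Char → List Char
  | _, [] => []
  | run, c :: cs =>
    if c = ' ' then c :: pvScan n 0 cs
    else if run = n then ' ' :: c :: pvScan n 1 cs
    else c :: pvScan n (run + 1) cs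

-- Split on ' ' with an explicit current-token prefix (spec form of str.split(" ")).
def pvSplit (pre : List Char) : List Char → List (List Char)
  | [] => [pre]
  | c :: rest => if c = ' ' then pre :: pvSplit [] rest else pvSplit (pre ++ [c]) rest

-- Chunks of size m+1.
def pvChunks (m : Nat) : List Char → List (List Char)
  | [] => []
  | c :: rest => (c :: rest.take m) :: pvChunks m (rest.drop m)
termination_by l => l.length
decreasing_by simp

theorem pvAlt_fold (n : Int) (cs : List Char) : ∀ (acc : List Char) (run : Int),
    (cs.foldl (fun (st : List Char × Int) ch =>
      if ch = ' ' then (st.1 ++ [ch], 0)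
      else if st.2 = n then (st.1 ++ [' ', ch], 1)
      else (st.1 ++ [ch], st.2 + 1)) (acc, run)).1 = acc ++ pvScan n run cs := by
  induction cs with
  | nil => intro acc run; simp [pvScan]
  | cons c cs ih =>
    intro acc run
    by_cases hc : c = ' '
    · simp [List.foldl_cons, hc, pvScan, ih]
    · by_cases hr : run = n
      · simp [List.foldl_cons, hc, hr, pvScan, ih]
      · simp [List.foldl_cons, hc, hr, pvScan, ih]

theorem pvAlt_eq (text : String) (n : Int) :
    break_long_tokens_py_alt text n = String.ofList (pvScan n 0 text.toList) := by
  unfold break_long_tokens_py_alt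
  dsimp only
  rw [pvAlt_fold n text.toList [] 0]
  simp

theorem pvSplit_go (fuel : Nat) : ∀ (l cur : List Char) (accs : List (List Char)),
    l.length < fuel →
    PySem.Chars.splitOn.go [' '] fuel l cur accs = accs.reverse ++ pvSplit cur.reverse l := by
  induction fuel with
  | zero => intro l cur accs h; omega
  | succ fuel ih =>
    intro l cur accs h
    cases l with
    | nil => simp [PySem.Chars.splitOn.go, pvSplit]
    | cons c rest =>
      by_cases hc : c = ' '
      · subst hc
        rw [PySem.Chars.splitOn.go]
        simp only [List.isPrefixOf, BEq.rfl, Bool.true_and, if_pos]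
        rw [show List.drop ([' '] : List Char).length (' ' :: rest) = rest from rfl]
        rw [ih rest [] (cur.reverse :: accs) (by simp at h; omega)]
        simp [pvSplit]
      · rw [PySem.Chars.splitOn.go]
        have hpre : ([' '] : List Char).isPrefixOf (c :: rest) = false := by
          simp [List.isPrefixOf]
          exact fun h' => hc h'.symm
        rw [if_neg (by simp [hpre])]
        rw [ih rest (c :: cur) accs (by simp at h; omega)]
        simp [pvSplit, hc]

theorem pvSplit_eq (s : List Char) : PySem.Chars.splitOn s [' '] = pvSplit [] s := by
  unfold PySem.Chars.splitOn
  rw [pvSplit_go (s.length + 1) s [] [] (by omega)]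
  simp

theorem pvSplit_ne_nil (l : List Char) : ∀ pre, pvSplit pre l ≠ [] := by
  induction l with
  | nil => intro pre; simp [pvSplit]
  | cons c rest ih =>
    intro pre
    by_cases hc : c = ' ' <;> simp [pvSplit, hc, ih]

theorem pvJoin_cons_ne (x : List Char) (ys : List (List Char)) (h : ys ≠ []) :
    PySem.Chars.join [' '] (x :: ys) = x ++ ' ' :: PySem.Chars.join [' '] ys := by
  cases ys with
  | nil => exact absurd rfl h
  | cons y ys' => rw [PySem.Chars.join_cons_cons]; simp

theorem pvSplit_join (l : List Char) : ∀ pre, PySem.Chars.join [' '] (pvSplit pre l) = pre ++ l := by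
  induction l with
  | nil => intro pre; simp [pvSplit, PySem.Chars.join_singleton]
  | cons c rest ih =>
    intro pre
    by_cases hc : c = ' '
    · subst hc
      rw [show pvSplit pre (' ' :: rest) = pre :: pvSplit [] rest from by simp [pvSplit]]
      rw [pvJoin_cons_ne pre _ (pvSplit_ne_nil rest []), ih []]
      simp
    · rw [show pvSplit pre (c :: rest) = pvSplit (pre ++ [c]) rest from by simp [pvSplit, hc]]
      rw [ih (pre ++ [c])]
      simp

theorem pvSplit_no_space (l : List Char) : ∀ pre, ' ' ∉ pre → ∀ t ∈ pvSplit pre l, ' ' ∉ t := by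
  induction l with
  | nil => intro pre hpre t ht; simp [pvSplit] at ht; subst ht; exact hpre
  | cons c rest ih =>
    intro pre hpre t ht
    by_cases hc : c = ' '
    · rw [pvSplit, if_pos hc] at ht
      rcases List.mem_cons.1 ht with h | h
      · subst h; exact hpre
      · exact ih [] (by simp) t h
    · rw [pvSplit, if_neg hc] at ht
      refine ih (pre ++ [c]) ?_ t ht
      intro hmem
      rcases List.mem_append.1 hmem with h | h
      · exact hpre h
      · simp at h; exact hc h.symm

theorem pvChunks_ne_nil (m : Nat) (l : List Char) (h : l ≠ []) : pvChunks m l ≠ [] := by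
  cases l with
  | nil => simp at h
  | cons c rest => rw [pvChunks]; simp

theorem pvScan_small (n : Int) (t : List Char) : ∀ run : Int, ' ' ∉ t →
    run ≤ n → (t.length : Int) ≤ n - run → pvScan n run t = t := by
  induction t with
  | nil => intro run _ _ _; simp [pvScan]
  | cons c cs ih =>
    intro run hns hrn hlen
    have hc : c ≠ ' ' := by intro h; exact hns (by simp [h])
    have hcs : ' ' ∉ cs := fun h => hns (by simp [h])
    have hlen' : (cs.length : Int) + 1 ≤ n - run := by simpa using hlen
    have hlt : run ≠ n := by omega
    rw [pvScan, if_neg hc, if_neg hlt, ih (run + 1) hcs (by omega) (by omega)]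

theorem pvScan_big (n : Int) (hn : 1 ≤ n) (t : List Char) : ∀ run : Int, ' ' ∉ t →
    0 ≤ run → run ≤ n → n - run < (t.length : Int) →
    pvScan n run t = t.take (n - run).toNat ++ ' ' :: pvScan n 0 (t.drop (n - run).toNat) := by
  induction t with
  | nil => intro run _ h0 hrn hl; simp at hl; omega
  | cons c cs ih =>
    intro run hns h0 hrn hl
    have hc : c ≠ ' ' := by intro h; exact hns (by simp [h])
    have hcs : ' ' ∉ cs := fun h => hns (by simp [h])
    have hl' : n - run < (cs.length : Int) + 1 := by simpa using hl
    by_cases hr : run = n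
    · rw [pvScan, if_neg hc, if_pos hr, show (n - run).toNat = 0 from by omega]
      simp only [List.take_zero, List.drop_zero, List.nil_append]
      rw [pvScan, if_neg hc, if_neg (show (0 : Int) ≠ n from by omega)]
      norm_num
    · have hcl : n - (run + 1) < (cs.length : Int) := by omega
      have hrec := ih (run + 1) hcs (by omega) (by omega) hcl
      rw [pvScan, if_neg hc, if_neg hr, hrec]
      rw [show (n - run).toNat = (n - (run + 1)).toNat + 1 from by omega]
      simp [List.take_succ_cons, List.drop_succ_cons]

theorem pvScan_token (n : Int) (hn : 1 ≤ n) (t : List Char) (h : ' ' ∉ t) :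
    pvScan n 0 t = PySem.Chars.join [' '] (pvChunks (n.toNat - 1) t) := by
  revert h
  induction t using pvChunks.induct (m := n.toNat - 1) with
  | case1 => intro _; simp [pvScan, pvChunks, PySem.Chars.join_nil]
  | case2 c rest ih =>
    intro h
    have hc : c ≠ ' ' := by intro hx; exact h (by simp [hx])
    have hcs : ' ' ∉ rest := fun hx => h (by simp [hx])
    by_cases hlen : ((c :: rest).length : Int) ≤ n
    · have hlen' : (rest.length : Int) + 1 ≤ n := by simpa using hlen
      rw [pvScan_small n (c :: rest) 0 h (by omega) (by simpa using hlen)]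
      have hdrop : rest.drop (n.toNat - 1) = [] := List.drop_eq_nil_of_le (by omega)
      have htake : rest.take (n.toNat - 1) = rest := List.take_of_length_le (by omega)
      rw [pvChunks, hdrop, htake, pvChunks, PySem.Chars.join_singleton]
    · have hlen' : n < (rest.length : Int) + 1 := by
        have := not_le.1 hlen; simpa using this
      rw [pvScan_big n hn (c :: rest) 0 h le_rfl (by omega) (by simpa using not_le.1 hlen)]
      have hdr : (c :: rest).drop (n - 0).toNat = rest.drop (n.toNat - 1) := by
        rw [show (n - 0).toNat = (n.toNat - 1) + 1 from by omega, List.drop_succ_cons]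
      have htk : (c :: rest).take (n - 0).toNat = c :: rest.take (n.toNat - 1) := by
        rw [show (n - 0).toNat = (n.toNat - 1) + 1 from by omega, List.take_succ_cons]
      have hne : rest.drop (n.toNat - 1) ≠ [] := by
        intro hx
        have := congrArg List.length hx
        simp at this
        omega
      rw [hdr, htk, ih (fun hx => hcs (List.mem_of_mem_drop hx)), pvChunks,
        pvJoin_cons_ne _ _ (pvChunks_ne_nil _ _ hne)]

theorem pvScan_append_space (n : Int) (t : List Char) : ∀ (run : Int) (rest : List Char), ' ' ∉ t →
    pvScan n run (t ++ ' ' :: rest) = pvScan n run t ++ ' ' :: pvScan n 0 rest := by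
  induction t with
  | nil => intro run rest _; simp [pvScan]
  | cons c cs ih =>
    intro run rest hns
    have hc : c ≠ ' ' := by intro h; exact hns (by simp [h])
    have hcs : ' ' ∉ cs := fun h => hns (by simp [h])
    by_cases hr : run = n <;> simp [pvScan, hc, hr, ih _ _ hcs]

theorem pvScan_join (n : Int) (ts : List (List Char)) (h : ∀ t ∈ ts, ' ' ∉ t) :
    pvScan n 0 (PySem.Chars.join [' '] ts) = PySem.Chars.join [' '] (ts.map (pvScan n 0)) := by
  induction ts with
  | nil => simp [PySem.Chars.join_nil, pvScan]
  | cons a ts ih =>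
    cases ts with
    | nil => simp [PySem.Chars.join_singleton]
    | cons b ts' =>
      have ha : ' ' ∉ a := h a (by simp)
      have h' : ∀ t ∈ b :: ts', ' ' ∉ t := fun t ht => h t (List.mem_cons_of_mem _ ht)
      rw [pvJoin_cons_ne _ _ (by simp : (b :: ts') ≠ []), pvScan_append_space n a 0 _ ha, ih h']
      conv_rhs => rw [List.map_cons, pvJoin_cons_ne _ _ (by simp)]

theorem pyRange_pos_nil (a b s : Int) (hs : 0 < s) (h : b ≤ a) : PySem.List.pyRange a b s = [] := by
  rw [PySem.List.pyRange_of_pos _ _ hs, if_neg (by omega)]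
  simp

theorem pyRange_pos_cons (a b s : Int) (hs : 0 < s) (h : a < b) :
    PySem.List.pyRange a b s = a :: PySem.List.pyRange (a + s) b s := by
  rw [PySem.List.pyRange_of_pos _ _ hs, PySem.List.pyRange_of_pos _ _ hs]
  have h1 : 0 ≤ (b - a - 1) / s := Int.ediv_nonneg (by omega) (by omega)
  have hcnt : ((b - a + s - 1) / s).toNat = ((b - a - 1) / s).toNat + 1 := by
    have he : b - a + s - 1 = (b - a - 1) + 1 * s := by ring
    rw [he, Int.add_mul_ediv_right _ _ (by omega : s ≠ 0)]
    omega
  rw [if_pos h, hcnt]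
  by_cases h2 : a + s < b
  · rw [if_pos h2]
    have he : b - (a + s) + s - 1 = b - a - 1 := by ring
    rw [he, List.range_succ_eq_map, List.map_cons, List.map_map]
    congr 1
    · simp
    · apply List.map_congr_left
      intro k _
      simp [Function.comp, Nat.succ_eq_add_one]
      ring
  · rw [if_neg h2]
    have hz : (b - a - 1) / s = 0 := Int.ediv_eq_zero_of_lt (by omega) (by omega)
    rw [hz]
    simp

theorem pyRange_shift (a b s c : Int) :
    PySem.List.pyRange (a + c) (b + c) s = (PySem.List.pyRange a b s).map (· + c) := by
  simp only [PySem.List.pyRange]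
  by_cases hs0 : s = 0
  · simp [hs0]
  · rw [if_neg hs0, if_neg hs0]
    have e1 : b + c - (a + c) = b - a := by ring
    have e2 : a + c - (b + c) = a - b := by ring
    rw [e1, e2]
    simp only [Int.add_lt_add_iff_right, List.map_map]
    apply List.map_congr_left
    intro k _
    simp [Function.comp]
    ring

theorem pvMapSlice (n : Int) (hn : 1 ≤ n) (t : List Char) :
    (PySem.List.pyRange 0 (t.length : Int) n).map
      (fun i => PySem.List.slice t (some i) (some (i + n))) = pvChunks (n.toNat - 1) t := by
  induction t using pvChunks.induct (m := n.toNat - 1) with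
  | case1 =>
    rw [pyRange_pos_nil 0 _ n (by omega) (by simp)]
    simp [pvChunks]
  | case2 c rest ih =>
    have hL : (0 : Int) < ((c :: rest).length : Int) := by simp
    rw [pyRange_pos_cons 0 _ n (by omega) hL, List.map_cons, pvChunks]
    congr 1
    · rw [zero_add, PySem.List.slice_zero_start, PySem.List.slice_to _ (by omega : (0:Int) ≤ n)]
      rw [show n.toNat = (n.toNat - 1) + 1 from by omega, List.take_succ_cons]
      simp
    · rw [show ((c :: rest).length : Int) = (((c :: rest).length : Int) - n) + n from by ring,
        pyRange_shift 0 (((c :: rest).length : Int) - n) n n, List.map_map]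
      by_cases hlen : rest.length ≤ n.toNat - 1
      · have hnil : ((c :: rest).length : Int) - n ≤ 0 := by simp; omega
        rw [pyRange_pos_nil 0 _ n (by omega) hnil]
        rw [List.drop_eq_nil_of_le hlen, pvChunks]
        simp
      · rw [Nat.not_le] at hlen
        have hlen' : ((c :: rest).length : Int) - n = ((rest.drop (n.toNat - 1)).length : Int) := by
          simp; omega
        rw [hlen', ← ih]
        apply List.map_congr_left
        intro i hi
        have hi0 : 0 ≤ i := ((PySem.List.mem_pyRange_iff_of_pos (by omega) i).1 hi).1
        simp only [Function.comp]
        rw [PySem.List.slice_toNat _ (by omega) (by omega),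
          PySem.List.slice_toNat _ hi0 (by omega)]
        have hdd : List.drop (i + n).toNat (c :: rest) =
            List.drop i.toNat (List.drop (n.toNat - 1) rest) := by
          rw [List.drop_drop, show (i + n).toNat = (n.toNat - 1 + i.toNat) + 1 from by omega,
            List.drop_succ_cons]
        rw [show (i + n + n).toNat - (i + n).toNat = n.toNat from by omega,
          show (i + n).toNat - i.toNat = n.toNat from by omega, hdd]

theorem pvA_eq (text : String) (n : Int) (hn : 1 ≤ n) :
    break_long_tokens_py text n =
      String.ofList (PySem.Chars.join [' '] ((pvSplit [] text.toList).map (pvScan n 0))) := by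
  unfold break_long_tokens_py
  dsimp only
  rw [pvSplit_eq]
  have hsp := pvSplit_no_space text.toList [] (by simp)
  rw [PySem.List.foldl_congr_mem (pvSplit [] text.toList) _
    (fun acc token => acc ++ [pvScan n 0 token]) []
    (by
      intro acc tok htok
      dsimp only
      have hts : ' ' ∉ tok := hsp tok htok
      by_cases hle : PySem.Chars.len tok ≤ n
      · rw [if_pos hle]
        rw [PySem.Chars.len_eq] at hle
        rw [pvScan_small n tok 0 hts (by omega) (by omega)]
      · rw [if_neg hle]
        rw [PySem.Chars.len_eq] at hle
        rw [not_le] at hle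
        simp only [PySem.Chars.len_eq, PySem.Chars.slice_eq_listSlice]
        rw [pvScan_token n hn tok hts, ← pvMapSlice n hn tok])]
  rw [PySem.List.foldl_append_singleton_eq_map]
  simp

theorem pvRange00 (m : Int) : PySem.List.pyRange 0 0 m = [] := by
  unfold PySem.List.pyRange
  split_ifs <;> simp <;> omega

theorem pvScan_spaces (m : Int) (cs : List Char) (h : ∀ c ∈ cs, c = ' ') : ∀ r, pvScan m r cs = cs := by
  induction cs with
  | nil => intro r; simp [pvScan]
  | cons c rest ih =>
    intro r
    have hc : c = ' ' := h c (by simp)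
    rw [pvScan, if_pos hc, ih (fun c hc' => h c (by simp [hc'])) 0]

theorem pvSplit_spaces (cs : List Char) (h : ∀ c ∈ cs, c = ' ') :
    pvSplit [] cs = List.replicate (cs.length + 1) [] := by
  induction cs with
  | nil => simp [pvSplit]
  | cons c rest ih =>
    have hc : c = ' ' := h c (by simp)
    rw [pvSplit, if_pos hc, ih (fun c hc' => h c (by simp [hc']))]
    simp [List.replicate_succ]

theorem pvJoin_empties (k : Nat) :
    PySem.Chars.join [' '] (List.replicate (k + 1) ([] : List Char)) = List.replicate k ' ' := by
  induction k with
  | zero => simp [PySem.Chars.join_singleton]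
  | succ k ih =>
    rw [List.replicate_succ, pvJoin_cons_ne _ _ (by simp), ih]
    simp [List.replicate_succ]

theorem pvA_spaces (text : String) (m : Int) (hsp : ∀ c ∈ text.toList, c = ' ') :
    break_long_tokens_py text m = String.ofList text.toList := by
  unfold break_long_tokens_py
  dsimp only
  rw [pvSplit_eq, pvSplit_spaces text.toList hsp]
  rw [PySem.List.foldl_congr_mem (List.replicate (text.toList.length + 1) ([] : List Char)) _
    (fun acc (_ : List Char) => acc ++ [([] : List Char)]) []
    (by
      intro acc tok htok
      have htok' : tok = [] := List.eq_of_mem_replicate htok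
      subst htok'
      dsimp only
      by_cases h0 : PySem.Chars.len ([] : List Char) ≤ m
      · rw [if_pos h0]
      · rw [if_neg h0]
        rw [show PySem.Chars.len ([] : List Char) = 0 from by simp [PySem.Chars.len_eq]]
        rw [pvRange00 m]
        simp [PySem.Chars.join_nil])]
  rw [PySem.List.foldl_append_singleton_eq_map, List.map_replicate]
  rw [List.nil_append, pvJoin_empties]
  rw [show List.replicate text.toList.length ' ' = text.toList from
    (List.eq_replicate_of_mem hsp).symm]

-- ===== VERDICT (by name: the statement is the Claim_ definition above) =====
theorem break_long_tokens_py_spec : Claim_equal_break_long_tokens_py := by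
  intro text n _hdom hpre
  unfold Spec_break_long_tokens_py
  by_cases hn : 1 ≤ n
  · have hsp := pvSplit_no_space text.toList [] (by simp)
    rw [pvA_eq text n hn, pvAlt_eq text n, ← pvScan_join n _ hsp, pvSplit_join text.toList []]
    simp
  · have hsp : ∀ c ∈ text.toList, c = ' ' := by
      rcases hpre with h | h
      · exact absurd h hn
      · intro c hc
        simpa using List.all_eq_true.1 h c hc
    rw [pvA_spaces text n hsp, pvAlt_eq text n, pvScan_spaces n text.toList hsp 0]
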